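-- pv_equiv track=rewrite | github.com/ctac1412/screenshot | flop.py | straight_collection
-- ===== SOURCE A (Python) =====
-- def straight_collection(hand):
--     collection = ['2', '3', '4', '5', '6', '7', '8', '9', 'T', 'J', 'Q', 'K', 'A']
--     arr = []
--     for val in hand:
--         arr.append(collection.index(val))
--     arr = list(set(arr))
--     arr = sorted(arr)
--     return arr
-- ===== SOURCE B (Python) =====
-- def straight_collection(hand):
--     collection = ['2', '3', '4', '5', '6', '7', '8', '9', 'T', 'J', 'Q', 'K', 'A']
--     handset = set(hand)
--     for c in handset:
--         if c not in collection:
--             raise ValueError(f"{c!r} is not in list")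
--     return [i for i, c in enumerate(collection) if c in handset]
-- ===== Notes on version B (the rewrite author's own statement) =====
-- stated objective: alternative
-- what changed: B inverts the traversal: instead of mapping each card to collection.index and then deduplicating and sorting, it validates the hand once against the 13-rank collection and then scans that fixed collection in order, emitting each index whose rank is in set(hand), so the result is sorted and duplicate-free by construction.
import Mathlib
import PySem

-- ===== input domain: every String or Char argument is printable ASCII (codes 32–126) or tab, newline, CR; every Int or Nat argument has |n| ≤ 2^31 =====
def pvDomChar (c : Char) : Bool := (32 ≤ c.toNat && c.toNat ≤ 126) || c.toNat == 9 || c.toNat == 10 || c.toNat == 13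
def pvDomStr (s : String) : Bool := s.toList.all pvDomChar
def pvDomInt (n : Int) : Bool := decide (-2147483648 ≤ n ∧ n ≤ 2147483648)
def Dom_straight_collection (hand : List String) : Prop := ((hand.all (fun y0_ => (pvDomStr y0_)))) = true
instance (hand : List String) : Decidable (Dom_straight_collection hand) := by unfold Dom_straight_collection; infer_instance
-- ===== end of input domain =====

-- B scans the fixed 13-rank collection once against set(hand) instead of mapping each card
-- through collection.index and then deduplicating and sorting; return values proved equal on Pre_.

-- ===== PORT A =====
-- A: arr = [collection.index(v) for v in hand] (loop with append); list(set(arr)); sorted(arr).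
-- collection.index raises ValueError when v ∉ collection; Pre_ excludes exactly those hands,
-- so the `.getD 0` default is never reached on admitted inputs.
def straight_collection (hand : List String) : List Int :=
  let collection : List String :=
    ["2", "3", "4", "5", "6", "7", "8", "9", "T", "J", "Q", "K", "A"]
  let arr : List Int :=
    hand.foldl (fun acc val => acc ++ [(((PySem.List.index? collection val).getD 0 : Nat) : Int)]) []
  let arr2 : PySem.Set Int := PySem.Set.ofList arr      -- list(set(arr)); order canonicalised by the sort below
  PySem.List.sorted arr2 (fun x => x) false

-- ===== PORT B =====
-- B validates the hand (raise ValueError on a card outside the collection — ported as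
-- returning []; those inputs are excluded by Pre_), then scans the collection in order.
def straight_collection_alt (hand : List String) : List Int :=
  let collection : List String :=
    ["2", "3", "4", "5", "6", "7", "8", "9", "T", "J", "Q", "K", "A"]
  let handset : PySem.Set String := PySem.Set.ofList hand
  if handset.all (fun c => c ∈ collection) then
    (PySem.List.enumerate collection).filterMap
      (fun p => if PySem.Set.contains handset p.2 then some p.1 else none)
  else []

-- ===== PRECONDITION & SPEC =====
-- Pre_ excludes exactly the hands containing a card outside the 13-rank collection,
-- on which A raises ValueError (list.index).
def Pre_straight_collection (hand : List String) : Prop :=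
  ∀ v ∈ hand, v ∈ (["2", "3", "4", "5", "6", "7", "8", "9", "T", "J", "Q", "K", "A"] : List String)
instance (hand : List String) : Decidable (Pre_straight_collection hand) := by
  unfold Pre_straight_collection; infer_instance

def pvWitness_straight_collection : List String := ["A", "2", "2", "K"]

def Spec_straight_collection (hand : List String) (out : List Int) : Prop :=
  out = straight_collection_alt hand
instance (hand : List String) (out : List Int) : Decidable (Spec_straight_collection hand out) := by
  unfold Spec_straight_collection; infer_instance

-- ===== CLAIM =====
def Claim_equal_straight_collection : Prop :=
  ∀ (hand : List String), Dom_straight_collection hand → Pre_straight_collection hand →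
    Spec_straight_collection hand (straight_collection hand)
-- ===== LEMMAS AND PROOFS =====

def pvC : List String := ["2", "3", "4", "5", "6", "7", "8", "9", "T", "J", "Q", "K", "A"]

-- the index A assigns to a card (total via getD; used only on cards in pvC)
def pvIdx (v : String) : Int := ((PySem.List.index? pvC v).getD 0 : Nat)

lemma pv_foldl_append {f : String → Int} (hand : List String) (acc : List Int) :
    hand.foldl (fun a v => a ++ [f v]) acc = acc ++ hand.map f := by
  induction hand generalizing acc with
  | nil => simp
  | cons x xs ih => simp [List.foldl, ih, List.append_assoc]

lemma pvC_nodup : pvC.Nodup := by decide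

lemma pv_idx_of_some (v : String) (j : Nat) (hj : PySem.List.index? pvC v = some j) :
    pvIdx v = (j : Int) := by
  unfold pvIdx; rw [hj]; rfl

lemma pv_idx_eq_iff (v : String) (hv : v ∈ pvC) (k : Nat) (hk : k < pvC.length) :
    pvIdx v = (k : Int) ↔ pvC[k] = v := by
  have hs : (PySem.List.index? pvC v).isSome := (PySem.List.index?_isSome_iff pvC v).2 hv
  obtain ⟨j, hj⟩ := Option.isSome_iff_exists.1 hs
  obtain ⟨hjlt, hjv, _⟩ := PySem.List.getElem_of_index?_eq_some hj
  constructor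
  · intro h
    rw [pv_idx_of_some v j hj] at h
    have hjk : j = k := by omega
    subst hjk; exact hjv
  · intro h
    have hjk : j = k := (pvC_nodup.getElem_inj_iff).1 (by rw [hjv, h])
    subst hjk; exact pv_idx_of_some v j hj

lemma pv_B_def (hand : List String) (hpre : Pre_straight_collection hand) :
    straight_collection_alt hand
      = (PySem.List.enumerate pvC).filterMap
          (fun p => if PySem.Set.contains (PySem.Set.ofList hand) p.2 then some p.1 else none) := by
  unfold straight_collection_alt
  have hall : (PySem.Set.ofList hand).all
      (fun c => decide (c ∈ (["2", "3", "4", "5", "6", "7", "8", "9", "T", "J", "Q", "K", "A"] : List String))) = true := by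
    rw [List.all_eq_true]
    intro c hc
    exact decide_eq_true (hpre c ((PySem.Set.mem_ofList _ _).1 hc))
  simp only [hall, if_true]
  rfl

lemma pv_mem_B_iff (hand : List String) (hpre : Pre_straight_collection hand) (x : Int) :
    x ∈ straight_collection_alt hand ↔
      ∃ (k : Nat) (hk : k < pvC.length), x = (k : Int) ∧ pvC[k] ∈ hand := by
  rw [pv_B_def hand hpre]
  simp only [List.mem_filterMap]
  constructor
  · rintro ⟨p, hp, hpx⟩
    obtain ⟨k, hk, rfl⟩ := (PySem.List.mem_enumerate_iff _ _ _).1 hp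
    simp at hpx
    exact ⟨k, hk, hpx.2.symm, hpx.1⟩
  · rintro ⟨k, hk, rfl, hmem⟩
    refine ⟨((0 : Int) + (k : Int), pvC[k]), ?_, ?_⟩
    · exact (PySem.List.mem_enumerate_iff _ _ _).2 ⟨k, hk, rfl⟩
    · simp [hmem]

lemma pv_B_pairwise (hand : List String) (hpre : Pre_straight_collection hand) :
    (straight_collection_alt hand).Pairwise (fun a b => a < b) := by
  rw [pv_B_def hand hpre]
  refine List.Pairwise.filterMap _ ?_ (PySem.List.pairwise_lt_enumerate pvC 0)
  rintro ⟨i, a⟩ ⟨j, b⟩ hij x hx y hy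
  by_cases ha : PySem.Set.contains (PySem.Set.ofList hand) a <;>
    by_cases hb : PySem.Set.contains (PySem.Set.ofList hand) b <;>
      simp_all

lemma pv_B_nodup (hand : List String) (hpre : Pre_straight_collection hand) :
    (straight_collection_alt hand).Nodup :=
  (pv_B_pairwise hand hpre).imp (fun h => ne_of_lt h)

lemma pv_mem_A_set_iff (hand : List String) (hpre : Pre_straight_collection hand) (x : Int) :
    x ∈ PySem.Set.ofList (hand.map pvIdx) ↔
      ∃ (k : Nat) (hk : k < pvC.length), x = (k : Int) ∧ pvC[k] ∈ hand := by
  rw [PySem.Set.mem_ofList]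
  simp only [List.mem_map]
  constructor
  · rintro ⟨v, hv, rfl⟩
    have hvc : v ∈ pvC := hpre v hv
    have hs : (PySem.List.index? pvC v).isSome := (PySem.List.index?_isSome_iff pvC v).2 hvc
    obtain ⟨j, hj⟩ := Option.isSome_iff_exists.1 hs
    obtain ⟨hjlt, hjv, _⟩ := PySem.List.getElem_of_index?_eq_some hj
    exact ⟨j, hjlt, pv_idx_of_some v j hj, by rw [hjv]; exact hv⟩
  · rintro ⟨k, hk, rfl, hmem⟩
    exact ⟨pvC[k], hmem, (pv_idx_eq_iff pvC[k] (pvC.getElem_mem hk) k hk).2 rfl⟩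

lemma pv_A_eq (hand : List String) :
    straight_collection hand
      = PySem.List.sorted (PySem.Set.ofList (hand.map pvIdx)) (fun x => x) false := by
  unfold straight_collection
  simp only [pv_foldl_append, List.nil_append]
  rfl

-- ===== VERDICT =====
theorem straight_collection_spec : Claim_equal_straight_collection := by
  intro hand _ hpre
  unfold Spec_straight_collection
  rw [pv_A_eq hand]
  refine PySem.List.sorted_eq_of_perm_of_pairwise_lt _ _ _ ?_ (pv_B_pairwise hand hpre)
  refine (List.perm_ext_iff_of_nodup (pv_B_nodup hand hpre) (PySem.Set.nodup_ofList _)).2 ?_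
  intro x
  rw [pv_mem_B_iff hand hpre x]
  exact (pv_mem_A_set_iff hand hpre x).symm
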